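/- GENERATED by mk_final_copies.py from the proof of the farm's unit `start_decoder.C16` (farm:start_decoder.C16.1: Proof.lean) as the
   re-elaboration sweep compiled it — do not edit. -/
/-
  `start_decoder.C16` (0x1151bf – 0x11520b; stb_vorbis_fixed.c:3956 – 3959): the time-domain transfers.

      1151bf mov rbp, [rsp+18H] ; mov esi, 6 ; mov rdi, rbp ; call get_bits ; lea r14d, [rax+1] ; mov r13d, [rsp+24H]
      1151da L: movzx eax, r14b ; cmp eax, r13d ; jle 11520c                       (exit to the floor section, `AtF1`)
      1151e3 mov esi, 10H ; mov rdi, rbp ; call get_bits ; test eax, eax ; jne 1151fa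
      1151f4 add r13d, 1 ; jmp L
      1151fa mov esi, 14H ; mov rdi, rbp ; call error ; jmp 113b22                  (the single epilogue, `AtERR`)

  THE PLAN. The segment assigns nothing: its only stores are the three pushed return addresses and what `get_bits` / `error` write
  (their stack below the steady rsp, the reader windows of `*f`, `f->error`). The invariant is carried as `Keep` (Lemmas.lean):
  `Mid g 5 5 5` (S5's "inside a section" form of SD.5, which has a frame lemma) and the memory-dependent fields of `Frame`.
      pre_loop   `BodyC16` → `Head` (the loop head 0x1151da with i = 0)
      loop_round `Head` → `AtF1 ∨ AtERR ∨ (Head ∧ measure smaller)`; measure x − i with x = r14b, i = r13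
      the theorem: `ReachVia.trans` and `ReachVia.loop`.
-/
import Asan.CheckWalk
import Vorbis.Spec.Units.start_decoder_C16
import Vorbis.Spec.Worked.start_decoder_C16_Lemmas

open X86 X86.User Asan Vorbis Vorbis.Spec Vorbis.Spec.StartDecoder

set_option maxRecDepth 4000
set_option maxHeartbeats 4000000

namespace Vorbis.Spec.start_decoder_C16

/-- The steady stack pointer as a word: `addr R = e.rsp − 1480`. -/
theorem addr_R {u₀ : State} {g : Ghost} {pc : Word} {A : Arena × List Obj} {v : State} (hf : Frame u₀ g pc A v) :
    addr g.R = g.e.reg .rsp - 1480 := by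
  obtain ⟨n1, n2, n3, n4⟩ := frame_nums hf
  unfold Ghost.R Ghost.RA steady
  have h : 1480 ≤ (g.e.reg .rsp).toNat := by
    unfold Ghost.RA at n3
    omega
  rw [← addr_sub_lit _ _ h, addr_toNat]

/-- **The test of loop 3957** (`movzx eax, r14b ; cmp eax, r13d ; jle`) as arithmetic: with `i ≤ x ≤ 255` both operands are small
non-negative numbers, so the signed comparison is the comparison of `x = r14 % 256` and `i = r13`. -/
theorem test_arith (r14 r13 : Word) (h : r13.toNat ≤ r14.toNat % 256) :
    ((BitVec.zeroExtend 32 (Word.part .w8 r14)).toInt ≤ (Word.part .w32 r13).toInt) ↔ r14.toNat % 256 ≤ r13.toNat := by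
  have hx : r14.toNat % 256 < 256 := Nat.mod_lt _ (by decide)
  have e1 : (BitVec.zeroExtend 32 (Word.part .w8 r14)).toNat = r14.toNat % 256 := by
    unfold Word.part
    simp only [Width.bits, BitVec.zeroExtend, BitVec.toNat_setWidth, UInt64.toNat_toBitVec]
    omega
  have e2 : (Word.part .w32 r13).toNat = r13.toNat := by
    rw [Vorbis.toNat_part32]
    omega
  rw [toInt_of_lt _ (by omega), toInt_of_lt _ (by omega), e1, e2]
  omega

/-- `add r13d, 1` with `i < 256`: the new register holds `i + 1`. -/
theorem incr_arith (r13 : Word) (h : r13.toNat < 256) : (Word.ofBV (Word.part .w32 r13 + 1#32)).toNat = r13.toNat + 1 := by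
  rw [Vorbis.toNat_ofBV32, BitVec.toNat_add, Vorbis.toNat_part32]
  have e : (1#32).toNat = 1 := rfl
  rw [e]
  omega

/-- **The assertion at the head of loop 3957** (0x1151da, `movzx eax, r14b`): FRAME with rbp = f, the clauses of SD.5 (`Mid g 5 5 5`),
r13 = i, r14b = x, `i ≤ x` (so the measure `x − i` is a natural number). -/
structure Head (u₀ : State) (g : Ghost) (A : Arena × List Obj) (s : State) : Prop where
  frame : Frame u₀ g Vorbis.L.start_decoder.loop15 A s
  hand : g.Hand A
  mid : Mid g 5 5 5 A.1 A s.mem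
  /-- rbp = f -/
  rbp : s.reg .rbp = addr g.f
  /-- i ≤ x: r13 holds `i` (zero-extended), the low byte of r14 holds `x` -/
  i_le : (s.reg .r13).toNat ≤ (s.reg .r14).toNat % 256

/-- The measure of loop 3957: `x − i`. -/
def meas (s : State) : Nat := (s.reg .r14).toNat % 256 - (s.reg .r13).toNat

/-- **From the segment's entry to the loop head** (0x1151bf … 0x1151da; stb_vorbis_fixed.c:3956): rbp is reloaded from the spill slot
`[R+18H]`, `x = get_bits(f, 6) + 1` goes to r14d, `i = 0` (the compiler's literal 0 in `[R+24H]`, Z24) to r13d. -/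
theorem pre_loop (Lay : Layout) (hLay : Lay.hi = 0x1000000) (μ : Microarch) (hμ : UserX.MicroOK μ) (u₀ : State)
    (hcode : HasCodeNat Lay u₀ Vorbis.L.start_decoder.entry Vorbis.Code.code_start_decoder.nat Vorbis.L.start_decoder.size)
    (h_get_bits : ∀ (others : List Obj) (frames : List (Nat × FrameLayout)) (Blk : Block → Prop) (len : Nat), Calls Lay μ Vorbis.WayInv (Vorbis.conv u₀) Vorbis.L.get_bits.entry (Vorbis.Spec.get_bits.spec others frames Blk len))
    (g : Ghost) (A : Arena × List Obj) (i : Nat) (v : State) (hat : BodyC16 u₀ g i A v) :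
    ReachVia Lay μ WayInv v (Head u₀ g A) := by
  have hf := hat.frame
  have hh := hat.hand
  -- the callee's contract, instantiated (the walker finds only hypotheses whose type is literally `Calls …`)
  have hgb := h_get_bits A.2 g.frames' (g.Blk A) g.len
  -- the entry state's facts (about `g.e`), the present state's facts under the walker's names
  have he := hf.entry
  v_entry he
  have w_rip := hf.rip
  have w_rsp : v.reg .rsp = g.e.reg .rsp - 1480 := by
    rw [hf.rsp]
    exact addr_R hf
  -- a second copy: the walker consumes `w_rsp` at the first step, the side goals still speak of `v.reg .rsp`
  have hvrsp := w_rsp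
  have w_eq : Mem.EqOn Vorbis.L.textLo Vorbis.L.textHi u₀.mem v.mem := hf.code
  have hdf : v.flags .df = false := (show abiInv _ from hf.inv).1
  have hmx : v.mxcsr &&& 0x1F80 = 0x1F80 := (show abiInv _ from hf.inv).2
  have hsse := Vorbis.sseOK_of_abiInv hf.inv
  simp only [StartDecoder.depth] at he_room he_stack
  have hRf : g.f < 2 ^ 64 := by
    have := (obj_where hf hh).2.1
    omega
  have hR : g.R = (g.e.reg .rsp).toNat - 1480 := rfl
  -- the two slots the segment loads: the spill of f at [R+18H], the literal 0 at [R+24H]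
  have r18 : v.mem.readLE (g.e.reg .rsp - 1456) 8 = g.f := by
    have e : g.e.reg .rsp - 1456 = addr (g.R + 0x18) := eq_addr _ _ (by u_omega)
    rw [e]
    exact hat.slot_f
  have hmid : Mid g 5 5 5 A.1 A v.mem := Mid.of_sd5 (sd5_of_sd4 hat.sd hat.all) (hat.own.own5 hat.all)
  have hk0 : Keep u₀ g A v.mem := Keep.of_frame hf hmid
  have z24 : v.mem.readLE (g.e.reg .rsp - 1444) 4 = 0 := by
    have e : g.e.reg .rsp - 1444 = addr (g.R + 0x24) := eq_addr _ _ (by u_omega)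
    rw [e]
    exact hmid.consts.z24 (by omega) (by omega)
  u_walk hcode [hμ.vendor] until [Vorbis.L.start_decoder.loop15] span [Vorbis.L.textLo, Vorbis.L.textHi] side (v_side)
  case call_inv =>
    v_inv
  case pre_1151cc =>
    -- get_bits' precondition: the shadow layer below the pushed return address, `ReaderEnv`, `Bits f`, n = 6 ≤ 32
    obtain ⟨hk1, hun1⟩ := hk0.push hf hh (g.e.reg .rsp - 1488) 1135057 (by u_omega)
    rw [← w_mem] at hk1 hun1
    have erdi : (s_1151cc.reg .rdi).toNat = g.f := by
      rw [w_rdi]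
      exact toNat_addr g.f hRf
    refine ⟨⟨shadowPre_call hf (by rw [w_rsp]; u_omega) hun1, ?_, ?_⟩, ?_⟩
    · rw [erdi]
      exact readerEnv_mid hh hk1.mid
    · rw [erdi]
      exact hk1.mid.bits
    · rw [bitsArg_def, w_rsi]
      decide
  -- 0x1151d1: get_bits(f, 6) has returned
  have hk1 := (hk0.push hf hh (g.e.reg .rsp - 1488) 1135057 (by u_omega)).1
  rw [← w_mem_1151cc] at hk1
  have erdi : (s_1151cc.reg .rdi).toNat = g.f := by
    rw [w_rdi_1151cc]
    exact toNat_addr g.f hRf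
  have hp : GetBitsSpecPost (g.Blk A) g.len (s_1151cc.reg .rdi).toNat (bitsArg s_1151cc) s_1151cc s_1151ccr := w_post
  simp only [X86.User.Spec.footprint, vspec] at w_same
  have hk2 : Keep u₀ g A s_1151ccr.mem :=
    hk1.get_bits hf hh (by rw [w_rsp_1151cc]; u_omega) erdi w_same hp.untouched (by rw [← erdi]; exact hp.bits.bits) w_code
  have w_eq := Vorbis.conv_code_eqOn w_code
  have hdf' : s_1151ccr.flags .df = false := (show abiInv _ from w_inv).1
  have hmx' : s_1151ccr.mxcsr &&& 0x1F80 = 0x1F80 := (show abiInv _ from w_inv).2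
  have hsse' := Vorbis.sseOK_of_abiInv w_inv
  have z24' : s_1151ccr.mem.readLE (g.e.reg .rsp - 1444) 4 = 0 := by
    have e : g.e.reg .rsp - 1444 = addr (g.R + 0x24) := eq_addr _ _ (by u_omega)
    rw [e]
    exact hk2.mid.consts.z24 (by omega) (by omega)
  clear w_same w_post hp
  obtain ⟨z, w_rax⟩ : ∃ z, s_1151ccr.reg .rax = z := ⟨_, rfl⟩
  u_walk hcode [hμ.vendor] until [Vorbis.L.start_decoder.loop15] span [Vorbis.L.textLo, Vorbis.L.textHi] side (v_side)
  -- 0x1151da: the loop head, `i = 0`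
  refine ReachVia.done ?_
  have hk3 : Keep u₀ g A s_1151d5.mem := by
    rw [w_mem]
    exact hk2
  have hinv3 : abiInv s_1151d5 := by
    refine ⟨?_, ?_⟩
    · rw [w_flags]
      exact hdf'
    · rw [w_mxcsr]
      exact hmx'
  have ersp : s_1151d5.reg .rsp = addr g.R := by
    rw [w_rsp]
    exact (addr_R hf).symm
  refine ⟨hk3.toFrame hf w_rip ersp hinv3, hh, hk3.mid, w_rbp, ?_⟩
  rw [w_r13, Vorbis.toNat_ofBV32]
  exact Nat.zero_le _

/-- **One round of loop 3957** (0x1151da … 0x1151f8): the test `i < x`; `z = get_bits(f, 16)`; `z ≠ 0` → `error`. -/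
theorem loop_round (Lay : Layout) (hLay : Lay.hi = 0x1000000) (μ : Microarch) (hμ : UserX.MicroOK μ) (u₀ : State)
    (hcode : HasCodeNat Lay u₀ Vorbis.L.start_decoder.entry Vorbis.Code.code_start_decoder.nat Vorbis.L.start_decoder.size)
    (h_get_bits : ∀ (others : List Obj) (frames : List (Nat × FrameLayout)) (Blk : Block → Prop) (len : Nat), Calls Lay μ Vorbis.WayInv (Vorbis.conv u₀) Vorbis.L.get_bits.entry (Vorbis.Spec.get_bits.spec others frames Blk len))
    (h_error : ∀ (others : List Obj) (frames : List (Nat × FrameLayout)), Calls Lay μ Vorbis.WayInv (Vorbis.conv u₀) Vorbis.L.error.entry (Vorbis.Spec.error.spec others frames))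
    (g : Ghost) (A : Arena × List Obj) (v : State) (hat : Head u₀ g A v) :
    ReachVia Lay μ WayInv v (fun w => (AtF1 u₀ g w ∨ AtERR u₀ g w) ∨ (Head u₀ g A w ∧ meas w < meas v)) := by
  have hf := hat.frame
  have hh := hat.hand
  have hmid := hat.mid
  have hgb := h_get_bits A.2 g.frames' (g.Blk A) g.len
  have herr := h_error A.2 g.frames'
  have he := hf.entry
  v_entry he
  have w_rip := hf.rip
  have w_rsp : v.reg .rsp = g.e.reg .rsp - 1480 := by
    rw [hf.rsp]
    exact addr_R hf
  have hvrsp := w_rsp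
  have w_rbp := hat.rbp
  have hvrbp := w_rbp
  have w_eq : Mem.EqOn Vorbis.L.textLo Vorbis.L.textHi u₀.mem v.mem := hf.code
  have hdf : v.flags .df = false := (show abiInv _ from hf.inv).1
  have hmx : v.mxcsr &&& 0x1F80 = 0x1F80 := (show abiInv _ from hf.inv).2
  have hsse := Vorbis.sseOK_of_abiInv hf.inv
  simp only [StartDecoder.depth] at he_room he_stack
  have hRf : g.f < 2 ^ 64 := by
    have := (obj_where hf hh).2.1
    omega
  have hR : g.R = (g.e.reg .rsp).toNat - 1480 := rfl
  have hk0 : Keep u₀ g A v.mem := Keep.of_frame hf hmid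
  have hile := hat.i_le
  u_walk hcode [hμ.vendor] until [Vorbis.L.start_decoder.loop15, Vorbis.L.start_decoder.cut186, Vorbis.L.start_decoder.cut4] span [Vorbis.L.textLo, Vorbis.L.textHi] side (v_side)
  case call_inv =>
    v_inv
  case pre_1151eb =>
    -- get_bits' precondition: the shadow layer below the pushed return address, `ReaderEnv`, `Bits f`, n = 16 ≤ 32
    obtain ⟨hk1, hun1⟩ := hk0.push hf hh (g.e.reg .rsp - 1488) 1135088 (by u_omega)
    rw [← w_mem] at hk1 hun1
    have erdi : (s_1151eb.reg .rdi).toNat = g.f := by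
      rw [w_rdi]
      exact toNat_addr g.f hRf
    refine ⟨⟨shadowPre_call hf (by rw [w_rsp]; u_omega) hun1, ?_, ?_⟩, ?_⟩
    · rw [erdi]
      exact readerEnv_mid hh hk1.mid
    · rw [erdi]
      exact hk1.mid.bits
    · rw [bitsArg_def, w_rsi]
      decide
  · -- 0x11520c: `x ≤ i`, the exit to the floor section (SD.5)
    refine ReachVia.done (Or.inl (Or.inl ⟨A, ?_⟩))
    have hk : Keep u₀ g A s_1151e1.mem := by
      rw [w_mem]
      exact hk0
    have hinv : abiInv s_1151e1 := by
      refine ⟨?_, ?_⟩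
      · rw [w_flags]
        simp only [X86.User.df_setStatus]
        exact hdf
      · rw [w_mxcsr]
        exact hmx
    have ersp : s_1151e1.reg .rsp = addr g.R := by
      rw [w_kept .rsp rfl]
      exact hf.rsp
    have erbp : s_1151e1.reg .rbp = addr g.f := by
      rw [w_kept .rbp rfl]
      exact hat.rbp
    exact
      { frame := hk.toFrame hf w_rip ersp hinv
        rbp := erbp
        sd := sd5_of_mid hk.mid
        hand := hh
        own := hk.mid.own }
  · -- 0x1151f0: get_bits(f, 16) has returned
    have hk1 := (hk0.push hf hh (g.e.reg .rsp - 1488) 1135088 (by u_omega)).1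
    rw [← w_mem_1151eb] at hk1
    have erdi : (s_1151eb.reg .rdi).toNat = g.f := by
      rw [w_rdi_1151eb]
      exact toNat_addr g.f hRf
    have hp : GetBitsSpecPost (g.Blk A) g.len (s_1151eb.reg .rdi).toNat (bitsArg s_1151eb) s_1151eb s_1151ebr := w_post
    simp only [X86.User.Spec.footprint, vspec] at w_same
    have hk2 : Keep u₀ g A s_1151ebr.mem :=
      hk1.get_bits hf hh (by rw [w_rsp_1151eb]; u_omega) erdi w_same hp.untouched (by rw [← erdi]; exact hp.bits.bits) w_code
    have w_eq := Vorbis.conv_code_eqOn w_code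
    have hdf' : s_1151ebr.flags .df = false := (show abiInv _ from w_inv).1
    have hmx' : s_1151ebr.mxcsr &&& 0x1F80 = 0x1F80 := (show abiInv _ from w_inv).2
    have hsse' := Vorbis.sseOK_of_abiInv w_inv
    have hf2 : Frame u₀ g s_1151ebr.rip A s_1151ebr := by
      refine hk2.toFrame hf rfl ?_ w_inv
      rw [w_rsp]
      exact (addr_R hf).symm
    clear w_same w_post hp
    obtain ⟨z, w_rax⟩ : ∃ z, s_1151ebr.reg .rax = z := ⟨_, rfl⟩
    u_walk hcode [hμ.vendor] until [Vorbis.L.start_decoder.loop15, Vorbis.L.start_decoder.cut186, Vorbis.L.start_decoder.cut4] span [Vorbis.L.textLo, Vorbis.L.textHi] side (v_side)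
    case call_inv =>
      v_inv
    case pre_115202 =>
      -- error's precondition: the shadow layer below the pushed return address, `*f` inside one live object
      obtain ⟨hk3, hun3⟩ := hk2.push hf hh (g.e.reg .rsp - 1488) 1135111 (by u_omega)
      rw [← w_mem] at hk3 hun3
      have erdi' : (s_115202.reg .rdi).toNat = g.f := by
        rw [w_rdi]
        exact toNat_addr g.f hRf
      refine ⟨shadowPre_call hf2 (by rw [w_rsp]; u_omega) hun3, ?_⟩
      rw [erdi']
      exact hh.obj.mono (frames'_sub g A.2)
    · -- 0x115207: error(f, VORBIS_invalid_setup) has returned 0; `jmp 113b22`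
      have hk3 := (hk2.push hf hh (g.e.reg .rsp - 1488) 1135111 (by u_omega)).1
      rw [← w_mem_115202] at hk3
      have erdi' : (s_115202.reg .rdi).toNat = g.f := by
        rw [w_rdi_115202]
        exact toNat_addr g.f hRf
      obtain ⟨w_rax, hun4, _⟩ := w_post
      simp only [X86.User.Spec.footprint, vspec] at w_same
      have hk4 : Keep u₀ g A s_115202r.mem :=
        hk3.error hf hh (by rw [w_rsp_115202]; u_omega) erdi' w_same hun4 w_code
      have w_eq := Vorbis.conv_code_eqOn w_code
      have hdf'' : s_115202r.flags .df = false := (show abiInv _ from w_inv).1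
      have hmx'' : s_115202r.mxcsr &&& 0x1F80 = 0x1F80 := (show abiInv _ from w_inv).2
      have hsse'' := Vorbis.sseOK_of_abiInv w_inv
      clear w_same
      u_walk hcode [hμ.vendor] until [Vorbis.L.start_decoder.loop15, Vorbis.L.start_decoder.cut186, Vorbis.L.start_decoder.cut4] span [Vorbis.L.textLo, Vorbis.L.textHi] side (v_side)
      -- 0x113b22: the single epilogue, eax = 0
      refine ReachVia.done (Or.inl (Or.inr ⟨A, ?_⟩))
      have hk5 : Keep u₀ g A s_115207.mem := by
        rw [w_mem]
        exact hk4
      have hinv5 : abiInv s_115207 := by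
        refine ⟨?_, ?_⟩
        · rw [w_flags]
          exact hdf''
        · rw [w_mxcsr]
          exact hmx''
      have ersp5 : s_115207.reg .rsp = addr g.R := by
        rw [w_rsp]
        exact (addr_R hf).symm
      refine ⟨hk5.toFrame hf w_rip ersp5 hinv5, hh, Or.inl ⟨?_, failed_of_mid hk5.mid⟩⟩
      rw [w_rax]
      rfl
    · -- 0x1151f8: `z = 0`, `++i`, the back edge
      refine ReachVia.done (Or.inr ⟨?_, ?_⟩)
      · have hk5 : Keep u₀ g A s_1151f8.mem := by
          rw [w_mem]
          exact hk2
        have hinv5 : abiInv s_1151f8 := by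
          refine ⟨?_, ?_⟩
          · rw [w_flags]
            simp only [X86.User.df_setStatus]
            exact hdf'
          · rw [w_mxcsr]
            exact hmx'
        have ersp5 : s_1151f8.reg .rsp = addr g.R := by
          rw [w_rsp]
          exact (addr_R hf).symm
        have erbp5 : s_1151f8.reg .rbp = addr g.f := by
          rw [w_kept .rbp rfl]
          exact hat.rbp
        refine ⟨hk5.toFrame hf w_rip ersp5 hinv5, hh, hk5.mid, erbp5, ?_⟩
        have hlt := (not_congr (test_arith _ _ hile)).mp hbr_1151e1
        rw [w_r13, w_kept .r14 rfl, incr_arith _ (by omega)]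
        omega
      · have hlt := (not_congr (test_arith _ _ hile)).mp hbr_1151e1
        unfold meas
        rw [w_r13, w_kept .r14 rfl, incr_arith _ (by omega)]
        omega

end Vorbis.Spec.start_decoder_C16

/-- Segment `start_decoder.C16` (the time-domain transfers, loop 3957) takes `AtC16` to `AtF1` (the hand-over to the floor section)
or to `AtERR` (the single epilogue with eax = 0). -/
theorem Vorbis.Spec.Worked.start_decoder_C16_ok : Vorbis.Spec.start_decoder_C16.Statement := by
  unfold Vorbis.Spec.start_decoder_C16.Statement
  intro Lay hLay μ hμ u₀ hcode h_get_bits h_error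
  intro g v hat
  obtain ⟨A, i, hb⟩ := hat
  -- 0x1151bf … 0x1151da: up to the loop head
  refine (Vorbis.Spec.start_decoder_C16.pre_loop Lay hLay μ hμ u₀ hcode h_get_bits g A i v hb).trans ?_
  intro w hw
  -- the loop, on the measure x − i
  exact ReachVia.loop Vorbis.Spec.start_decoder_C16.meas
    (fun s hs => Vorbis.Spec.start_decoder_C16.loop_round Lay hLay μ hμ u₀ hcode h_get_bits h_error g A s hs) w hw
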